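-- pv_equiv track=rewrite | github.com/qyuan2/TAGAPT_generated_samples | Find_hub_process_test.py | get_uncover_entity
-- ===== SOURCE A (Python) =====
-- def get_uncover_entity(entity_list,paths):
--     uncover_entity = []
--     for i in range(len(entity_list)):
--         flag = False
--         for path in paths:
--             if i in path:
--                 flag = True
--         if flag == False:
--             uncover_entity.append(i)
--     return uncover_entity
-- ===== SOURCE B (Python) =====
-- def get_uncover_entity(entity_list, paths):
--     remaining = set(range(len(entity_list)))
--     for path in paths:
--         remaining.difference_update(path)
--     return sorted(remaining)
-- ===== Notes on version B (the rewrite author's own statement) =====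
-- stated objective: faster
-- what changed: Instead of testing every index against every path with a nested membership loop, B starts from the set of all indices and shrinks it with one set-difference per path, then returns the sorted remainder.
import Mathlib
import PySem

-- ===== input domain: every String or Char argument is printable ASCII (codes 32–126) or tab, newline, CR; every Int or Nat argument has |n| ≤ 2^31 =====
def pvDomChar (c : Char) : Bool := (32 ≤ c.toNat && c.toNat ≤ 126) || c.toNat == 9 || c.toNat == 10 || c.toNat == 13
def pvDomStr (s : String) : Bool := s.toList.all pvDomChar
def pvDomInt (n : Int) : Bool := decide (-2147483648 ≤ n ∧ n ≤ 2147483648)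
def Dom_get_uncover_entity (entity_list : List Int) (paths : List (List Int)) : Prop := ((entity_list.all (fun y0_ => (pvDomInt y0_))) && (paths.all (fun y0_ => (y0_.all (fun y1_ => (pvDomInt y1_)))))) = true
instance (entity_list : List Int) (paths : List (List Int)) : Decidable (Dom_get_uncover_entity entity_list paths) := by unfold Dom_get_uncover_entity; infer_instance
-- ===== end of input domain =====

-- B replaces A's nested per-index membership scan by one shrinking 'remaining' set
-- (set difference per path, then sorted); objective: faster.

-- ===== PORT A =====
def get_uncover_entity (entity_list : List Int) (paths : List (List Int)) : List Int :=
  (PySem.List.pyRange 0 entity_list.length 1).foldl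
    (fun uncover_entity i =>
      let flag := paths.foldl (fun flag path => if path.contains i then true else flag) false
      if flag == false then uncover_entity ++ [i] else uncover_entity)
    []

-- ===== PORT B =====
def get_uncover_entity_alt (entity_list : List Int) (paths : List (List Int)) : List Int :=
  let remaining : PySem.Set Int := PySem.Set.ofList (PySem.List.pyRange 0 entity_list.length 1)
  let remaining := paths.foldl (fun s path => PySem.Set.diff s path) remaining
  PySem.List.sorted remaining (fun x => x) false

-- ===== PRECONDITION & SPEC =====
def Spec_get_uncover_entity (entity_list : List Int) (paths : List (List Int)) (out : List Int) : Prop := out = get_uncover_entity_alt entity_list paths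
instance (entity_list : List Int) (paths : List (List Int)) (out : List Int) : Decidable (Spec_get_uncover_entity entity_list paths out) := by unfold Spec_get_uncover_entity; infer_instance

-- ===== CLAIM (what is proved, stated in full; the proofs are below) =====
def Claim_equal_get_uncover_entity : Prop := ∀ (entity_list : List Int) (paths : List (List Int)), Dom_get_uncover_entity entity_list paths → Spec_get_uncover_entity entity_list paths (get_uncover_entity entity_list paths)

-- ===== LEMMAS AND PROOFS =====

-- A's inner flag loop computes 'does any path contain i'
theorem pv_flag_eq (paths : List (List Int)) (i : Int) (b : Bool) :
    paths.foldl (fun flag path => if path.contains i then true else flag) b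
      = (b || paths.any (fun path => path.contains i)) := by
  induction paths generalizing b with
  | nil => simp
  | cons p ps ih =>
    rw [List.foldl_cons, ih]
    simp only [List.any_cons]
    rcases h : p.contains i <;> simp at h <;> simp_all

-- A is the in-order filter of range(n) by 'no path contains i'
theorem pv_A_eq_filter (entity_list : List Int) (paths : List (List Int)) :
    get_uncover_entity entity_list paths
      = (PySem.List.pyRange 0 entity_list.length 1).filter
          (fun i => !(paths.any (fun path => path.contains i))) := by
  unfold get_uncover_entity
  have h : (fun (uncover_entity : List Int) (i : Int) =>
      let flag := paths.foldl (fun flag path => if path.contains i then true else flag) false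
      if flag == false then uncover_entity ++ [i] else uncover_entity)
      = (fun uncover_entity i =>
        if (!(paths.any (fun path => path.contains i))) then uncover_entity ++ [i]
        else uncover_entity) := by
    funext acc i
    simp only [pv_flag_eq, Bool.false_or]
    cases paths.any (fun path => path.contains i) <;> simp
  rw [h, PySem.List.foldl_append_if_eq_filter]
  simp

-- one set-difference step is a filter
theorem pv_diff_eq_filter (s : List Int) (t : List Int) :
    PySem.Set.diff s t = s.filter (fun x => ! t.contains x) := by
  simp [PySem.Set.diff]

-- B's fold of differences is the filter by 'no path contains i'
theorem pv_foldl_diff (paths : List (List Int)) (s : List Int) :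
    paths.foldl (fun s path => PySem.Set.diff s path) s
      = s.filter (fun i => !(paths.any (fun path => path.contains i))) := by
  induction paths generalizing s with
  | nil => simp
  | cons p ps ih =>
    rw [List.foldl_cons, ih, pv_diff_eq_filter, List.filter_filter]
    congr 1
    funext i
    cases h1 : p.contains i <;> cases h2 : ps.any (fun path => path.contains i) <;> simp_all

-- ===== VERDICT (by name: the statement is the Claim_ definition above) =====
theorem get_uncover_entity_spec : Claim_equal_get_uncover_entity := by
  intro entity_list paths _
  unfold Spec_get_uncover_entity
  rw [pv_A_eq_filter]
  show _ = PySem.List.sorted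
      (paths.foldl (fun s path => PySem.Set.diff s path)
        (PySem.Set.ofList (PySem.List.pyRange 0 entity_list.length 1))) (fun x => x) false
  have hn : (PySem.List.pyRange 0 (entity_list.length : Int) 1).Nodup := by
    apply PySem.List.nodup_pyRange_one
  have hp : (PySem.List.pyRange 0 (entity_list.length : Int) 1).Pairwise (· < ·) := by
    apply PySem.List.pairwise_lt_pyRange_one
  rw [PySem.Set.ofList_eq_self_of_nodup _ hn, pv_foldl_diff]
  exact (PySem.List.sorted_eq_of_perm_of_pairwise_lt _ _ _ (List.Perm.refl _) (hp.filter _)).symm
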